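-- pv_equiv track=rewrite | github.com/desmondhw/InvestmentReportsClassifier | Codes/functions.py | getCorpus
-- ===== SOURCE A (Python) =====
-- def getCorpus(sectorList, stopwords):
--     '''Returns a corpus list-of-list, and a flat-corpus'''
--     '''Stopword removal implemented'''
--     corpus = []
--
--     # Each sector is a list of list
--     for sector in sectorList:
--         corpus.extend(sector)
--     corpus = [[w for w in sublist if w not in stopwords] for sublist in corpus]
--     flat = [w for sublist in corpus for w in sublist]
--
--     return corpus, flat
-- ===== SOURCE B (Python) =====
-- def getCorpus(sectorList, stopwords):
--     '''Build the flat corpus first (one word-level pass over a stopword set),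
--     recording (start, end) bounds per document; the nested corpus is then
--     reconstructed by slicing the flat list.'''
--     stop = set(stopwords)
--     flat = []
--     bounds = []
--     for sector in sectorList:
--         for sublist in sector:
--             start = len(flat)
--             for w in sublist:
--                 if w not in stop:
--                     flat.append(w)
--             bounds.append((start, len(flat)))
--     corpus = [flat[s:e] for (s, e) in bounds]
--     return corpus, flat
-- ===== Notes on version B (the rewrite author's own statement) =====
-- stated objective: alternative
-- what changed: B reverses A's data flow: instead of flattening sectors, filtering per sublist, then deriving flat from the nested corpus, B builds the flat word list first in a single word-level pass over a stopword set while recording (start, end) index bounds per document, and reconstructs the nested corpus by slicing the flat list at those bounds.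
import Mathlib
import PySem

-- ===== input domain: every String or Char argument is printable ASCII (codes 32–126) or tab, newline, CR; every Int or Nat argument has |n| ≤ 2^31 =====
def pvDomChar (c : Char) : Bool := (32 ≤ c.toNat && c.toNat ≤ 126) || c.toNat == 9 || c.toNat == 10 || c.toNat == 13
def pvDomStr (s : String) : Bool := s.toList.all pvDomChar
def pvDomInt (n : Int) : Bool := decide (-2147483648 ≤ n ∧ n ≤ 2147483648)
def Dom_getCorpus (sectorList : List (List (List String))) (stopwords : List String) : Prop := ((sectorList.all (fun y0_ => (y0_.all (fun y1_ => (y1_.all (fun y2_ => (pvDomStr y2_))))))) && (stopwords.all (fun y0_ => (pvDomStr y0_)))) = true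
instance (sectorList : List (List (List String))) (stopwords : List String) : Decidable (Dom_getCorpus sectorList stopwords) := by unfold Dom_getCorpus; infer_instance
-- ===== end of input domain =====

-- B reverses A's data flow: it builds the flat corpus first in one word-level pass over a
-- stopword set, recording (start, end) bounds per document, and reconstructs the nested
-- corpus by slicing the flat list (objective: alternative).
-- ===== PORT A =====
def getCorpus (sectorList : List (List (List String))) (stopwords : List String) : List (List String) × List String :=
  -- corpus = []; for sector in sectorList: corpus.extend(sector)
  let corpus := sectorList.foldl (fun c sector => c ++ sector) []
  -- corpus = [[w for w in sublist if w not in stopwords] for sublist in corpus]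
  let corpus := corpus.map (fun sublist => sublist.filter (fun w => !stopwords.contains w))
  -- flat = [w for sublist in corpus for w in sublist]
  let flat := corpus.foldl (fun acc sublist => acc ++ sublist) []
  (corpus, flat)

-- ===== PORT B =====
def getCorpus_alt (sectorList : List (List (List String))) (stopwords : List String) : List (List String) × List String :=
  -- stop = set(stopwords)
  let stop := PySem.Set.ofList stopwords
  -- for sector in sectorList: for sublist in sector: … append words not in stop, record bounds
  let st := sectorList.foldl (fun st sector =>
    sector.foldl (fun (st : List String × List (Int × Int)) sublist =>
      let start : Int := st.1.length
      let flat := sublist.foldl (fun fl w =>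
        if !PySem.Set.contains stop w then fl ++ [w] else fl) st.1
      (flat, st.2 ++ [(start, (flat.length : Int))])) st) ([], [])
  -- corpus = [flat[s:e] for (s, e) in bounds]
  (st.2.map (fun p => PySem.List.slice st.1 (some p.1) (some p.2)), st.1)

-- ===== PRECONDITION & SPEC =====
def Spec_getCorpus (sectorList : List (List (List String))) (stopwords : List String) (out : List (List String) × List String) : Prop := out = getCorpus_alt sectorList stopwords
instance (sectorList : List (List (List String))) (stopwords : List String) (out : List (List String) × List String) : Decidable (Spec_getCorpus sectorList stopwords out) := by unfold Spec_getCorpus; infer_instance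

-- ===== CLAIM (what is proved, stated in full; the proofs are below) =====
def Claim_equal_getCorpus : Prop := ∀ (sectorList : List (List (List String))) (stopwords : List String), Dom_getCorpus sectorList stopwords → Spec_getCorpus sectorList stopwords (getCorpus sectorList stopwords)

-- ===== LEMMAS AND PROOFS =====
-- abbreviation used only by the proofs: the filtered form of a sublist
def pvFilt (sw : List String) (s : List String) : List String :=
  s.filter (fun w => !sw.contains w)

-- the bounds B records for a run of sublists, as Nat pairs, starting at offset n
def pvOffs (sw : List String) (n : Nat) : List (List String) → List (Nat × Nat)
  | [] => []
  | s :: t => (n, n + (pvFilt sw s).length) :: pvOffs sw (n + (pvFilt sw s).length) t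

-- folding (++) from an accumulator is the accumulator followed by the flattening
theorem pv_foldl_app {a : Type} (l : List (List a)) (acc : List a) :
    l.foldl (fun c s => c ++ s) acc = acc ++ l.flatten := by
  induction l generalizing acc with
  | nil => simp
  | cons h t ih => simp [ih]

-- filtering by absence from set(stopwords) is filtering by absence from stopwords
theorem pv_filter_eq (sw : List String) (s : List String) :
    s.filter (fun w => !PySem.Set.contains (PySem.Set.ofList sw) w) = pvFilt sw s := by
  unfold pvFilt
  congr 1
  funext w
  by_cases h : w ∈ sw <;> simp [h, PySem.Set.mem_ofList]

-- B's inner loop over one sector, with a general accumulator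
theorem pv_inner (sw : List String) (sector : List (List String))
    (st : List String × List (Int × Int)) :
    sector.foldl (fun (st : List String × List (Int × Int)) sublist =>
      let start : Int := st.1.length
      let flat := sublist.foldl (fun fl w =>
        if !PySem.Set.contains (PySem.Set.ofList sw) w then fl ++ [w] else fl) st.1
      (flat, st.2 ++ [(start, (flat.length : Int))])) st
    = (st.1 ++ (sector.map (pvFilt sw)).flatten,
       st.2 ++ (pvOffs sw st.1.length sector).map (fun q => ((q.1 : Int), (q.2 : Int)))) := by
  induction sector generalizing st with
  | nil => simp [pvOffs]
  | cons h t ih =>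
      rw [List.foldl_cons, ih, PySem.List.foldl_append_if_eq_filter, pv_filter_eq]
      simp [pvOffs, List.length_append]
  
-- B's outer loop, with a general accumulator
theorem pv_outer (sw : List String) (sl : List (List (List String)))
    (st : List String × List (Int × Int)) :
    sl.foldl (fun st sector =>
      sector.foldl (fun (st : List String × List (Int × Int)) sublist =>
        let start : Int := st.1.length
        let flat := sublist.foldl (fun fl w =>
          if !PySem.Set.contains (PySem.Set.ofList sw) w then fl ++ [w] else fl) st.1
        (flat, st.2 ++ [(start, (flat.length : Int))])) st) st
    = (st.1 ++ (sl.flatten.map (pvFilt sw)).flatten,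
       st.2 ++ (pvOffs sw st.1.length sl.flatten).map (fun q => ((q.1 : Int), (q.2 : Int)))) := by
  induction sl generalizing st with
  | nil => simp [pvOffs]
  | cons h t ih =>
      rw [List.foldl_cons, pv_inner, ih]
      -- pvOffs over a concatenation splits at the length of the first block's filtered flattening
      have hsplit : ∀ (A B : List (List String)) (n : Nat),
          pvOffs sw n (A ++ B) = pvOffs sw n A ++ pvOffs sw (n + ((A.map (pvFilt sw)).flatten).length) B := by
        intro A
        induction A with
        | nil => intro B n; simp [pvOffs]
        | cons a ta iha => intro B n; simp [pvOffs, iha, Nat.add_assoc]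
      simp [hsplit]

-- slicing the final flat list at the recorded bounds recovers the filtered sublists
theorem pv_slices (sw : List String) (M : List (List String)) (p : List String) (rest : List String) :
    (pvOffs sw p.length M).map (fun q =>
      PySem.List.slice (p ++ (M.map (pvFilt sw)).flatten ++ rest) (some ((q.1 : Nat) : Int)) (some ((q.2 : Nat) : Int)))
    = M.map (pvFilt sw) := by
  induction M generalizing p rest with
  | nil => simp [pvOffs]
  | cons s t ih =>
      simp only [pvOffs, List.map_cons, List.flatten_cons]
      congr 1
      · rw [PySem.List.slice_natCast]
        simp [List.append_assoc]
      · have := ih (p ++ pvFilt sw s) rest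
        simpa [List.append_assoc] using this

-- pv_slices with no prefix and no suffix
theorem pv_slices0 (sw : List String) (M : List (List String)) :
    (pvOffs sw 0 M).map (fun q =>
      PySem.List.slice ((M.map (pvFilt sw)).flatten) (some ((q.1 : Nat) : Int)) (some ((q.2 : Nat) : Int)))
    = M.map (pvFilt sw) := by
  simpa using pv_slices sw M [] []

-- ===== VERDICT (by name: the statement is the Claim_ definition above) =====
theorem getCorpus_spec : Claim_equal_getCorpus := by
  intro sl sw _
  unfold Spec_getCorpus getCorpus getCorpus_alt
  rw [pv_foldl_app]
  simp only [List.nil_append]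
  rw [pv_outer]
  simp only [List.length_nil, List.nil_append, List.map_map, Function.comp_def]
  rw [pv_slices0, pv_foldl_app]
  have hL : pvFilt sw = (fun sublist => List.filter (fun w => !decide (w ∈ sw)) sublist) := by
    funext s; simp [pvFilt]
  simp [hL]
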